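-- pv_equiv track=rewrite | github.com/boybou/opdrachteniscript | GameOfLife.py | input_parser
-- ===== SOURCE A (Python) =====
-- def input_parser(generatie_string):
--     generatie = []
--     temp_list = []
--     # een for loop die door alle string elementen heen loopt en er zo een lijst in lijsten van maakt
--     for x in generatie_string:
--         if x.lower() == "x":
--             temp_list.append(True)
--         elif x.lower() == "o":
--             temp_list.append(False)
--         elif x == ",":
--             generatie.append(temp_list)
--             temp_list = []
--     generatie.append(temp_list)
--     return generatie
-- ===== SOURCE B (Python) =====
-- def input_parser(generatie_string):
--     return [
--         [c.lower() == "x" for c in segment if c.lower() in ("x", "o")]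
--         for segment in generatie_string.split(",")
--     ]
-- ===== Notes on version B (the rewrite author's own statement) =====
-- stated objective: simpler
-- what changed: Replaces A's single flat character loop with mutable row/accumulator state by first splitting on the comma separator and then building each row with a filtered per-segment comprehension.
import Mathlib
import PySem

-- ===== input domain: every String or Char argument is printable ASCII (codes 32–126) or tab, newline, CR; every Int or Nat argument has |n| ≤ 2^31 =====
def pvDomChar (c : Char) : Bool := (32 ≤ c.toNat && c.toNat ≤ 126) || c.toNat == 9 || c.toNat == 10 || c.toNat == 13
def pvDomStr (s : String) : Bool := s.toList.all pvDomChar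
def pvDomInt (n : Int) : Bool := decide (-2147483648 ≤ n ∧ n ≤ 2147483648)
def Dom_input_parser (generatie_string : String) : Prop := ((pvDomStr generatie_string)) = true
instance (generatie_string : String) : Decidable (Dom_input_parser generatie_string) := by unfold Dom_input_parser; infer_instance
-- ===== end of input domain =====

-- B changes A's single flat character loop (mutable row + accumulator) into split-on-comma
-- followed by a filtered comprehension per segment; objective: simpler.

-- ===== PORT A =====
def input_parser (generatie_string : String) : List (List Bool) :=
  let st := generatie_string.toList.foldl
    (fun (st : List (List Bool) × List Bool) x =>
      if PySem.Chars.lowerChar x == 'x' then (st.1, st.2 ++ [true])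
      else if PySem.Chars.lowerChar x == 'o' then (st.1, st.2 ++ [false])
      else if x == ',' then (st.1 ++ [st.2], [])
      else st)
    ([], [])
  st.1 ++ [st.2]

-- ===== PORT B =====
-- Source B: [[c.lower() == "x" for c in segment if c.lower() in ("x","o")] for segment in s.split(",")]
def input_parser_alt (generatie_string : String) : List (List Bool) :=
  (PySem.Chars.splitOn generatie_string.toList [',']).map
    (fun seg =>
      (seg.filter (fun c => PySem.Chars.lowerChar c == 'x' || PySem.Chars.lowerChar c == 'o')).map
        (fun c => PySem.Chars.lowerChar c == 'x'))

-- ===== PRECONDITION & SPEC =====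
def Spec_input_parser (generatie_string : String) (out : List (List Bool)) : Prop := out = input_parser_alt generatie_string
instance (generatie_string : String) (out : List (List Bool)) : Decidable (Spec_input_parser generatie_string out) := by unfold Spec_input_parser; infer_instance

-- ===== CLAIM (what is proved, stated in full; the proofs are below) =====
def Claim_equal_input_parser : Prop := ∀ (generatie_string : String), Dom_input_parser generatie_string → Spec_input_parser generatie_string (input_parser generatie_string)

-- ===== LEMMAS AND PROOFS =====

-- reference splitter for a single-character separator ','
def pvSplit1 : List Char → List (List Char)
  | [] => [[]]
  | c :: rest =>
    if c = ',' then [] :: pvSplit1 rest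
    else match pvSplit1 rest with
      | r :: rs => (c :: r) :: rs
      | [] => [[c]]

lemma pvSplit1_ne_nil (l : List Char) : pvSplit1 l ≠ [] := by
  cases l with
  | nil => simp [pvSplit1]
  | cons c rest =>
    simp only [pvSplit1]
    split
    · simp
    · split <;> simp

lemma pvGo_eq (fuel : Nat) : ∀ (l cur : List Char) (accs : List (List Char)),
    l.length < fuel →
    PySem.Chars.splitOn.go [','] fuel l cur accs =
      accs.reverse ++ (match pvSplit1 l with
        | r :: rs => (cur.reverse ++ r) :: rs
        | [] => []) := by
  induction fuel with
  | zero => intro l cur accs h; omega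
  | succ n ih =>
    intro l cur accs h
    cases l with
    | nil =>
      simp [PySem.Chars.splitOn.go, pvSplit1]
    | cons c rest =>
      by_cases hc : c = ','
      · subst hc
        have hpre : List.isPrefixOf [','] (',' :: rest) = true := by
          simp [List.isPrefixOf]
        rw [PySem.Chars.splitOn.go]
        simp only [hpre, if_true, List.length_cons, List.drop_succ_cons, List.length_nil, List.drop_zero]
        rw [ih rest [] (cur.reverse :: accs) (by simp at h; omega)]
        simp only [pvSplit1, if_true]
        cases hs : pvSplit1 rest with
        | nil => exact absurd hs (pvSplit1_ne_nil rest)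
        | cons r rs => simp
      · have hpre : List.isPrefixOf [','] (c :: rest) = false := by
          simp [List.isPrefixOf]
          exact fun h => hc h.symm
        rw [PySem.Chars.splitOn.go]
        simp only [hpre]
        rw [if_neg (by simp)]
        rw [ih rest (c :: cur) accs (by simp at h; omega)]
        simp only [pvSplit1, if_neg hc]
        cases hs : pvSplit1 rest with
        | nil => exact absurd hs (pvSplit1_ne_nil rest)
        | cons r rs => simp

lemma pvSplitOn_eq (l : List Char) : PySem.Chars.splitOn l [','] = pvSplit1 l := by
  rw [PySem.Chars.splitOn, pvGo_eq (l.length + 1) l [] [] (by omega)]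
  cases hs : pvSplit1 l with
  | nil => exact absurd hs (pvSplit1_ne_nil l)
  | cons r rs => simp

-- row built by B from one segment
def pvRow (seg : List Char) : List Bool :=
  (seg.filter (fun c => PySem.Chars.lowerChar c == 'x' || PySem.Chars.lowerChar c == 'o')).map
    (fun c => PySem.Chars.lowerChar c == 'x')

lemma pvLoopA (cs : List Char) : ∀ (acc : List (List Bool)) (temp : List Bool),
    (let st := cs.foldl
      (fun (st : List (List Bool) × List Bool) x =>
        if PySem.Chars.lowerChar x == 'x' then (st.1, st.2 ++ [true])
        else if PySem.Chars.lowerChar x == 'o' then (st.1, st.2 ++ [false])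
        else if x == ',' then (st.1 ++ [st.2], [])
        else st)
      (acc, temp)
     st.1 ++ [st.2]) =
    acc ++ (match (pvSplit1 cs).map pvRow with
      | r :: rs => (temp ++ r) :: rs
      | [] => []) := by
  induction cs with
  | nil => intro acc temp; simp [pvSplit1, pvRow]
  | cons c rest ih =>
    intro acc temp
    simp only [List.foldl_cons]
    by_cases hx : PySem.Chars.lowerChar c = 'x'
    · have hc : c ≠ ',' := by
        intro h; subst h; exact absurd hx (by decide)
      rw [if_pos (by simp [hx])]
      rw [ih acc (temp ++ [true])]
      simp only [pvSplit1, if_neg hc]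
      cases hs : pvSplit1 rest with
      | nil => exact absurd hs (pvSplit1_ne_nil rest)
      | cons r rs => simp [pvRow, hx]
    · by_cases ho : PySem.Chars.lowerChar c = 'o'
      · have hc : c ≠ ',' := by
          intro h; subst h; exact absurd ho (by decide)
        rw [if_neg (by simp [hx]), if_pos (by simp [ho])]
        rw [ih acc (temp ++ [false])]
        simp only [pvSplit1, if_neg hc]
        cases hs : pvSplit1 rest with
        | nil => exact absurd hs (pvSplit1_ne_nil rest)
        | cons r rs => simp [pvRow, ho]
      · by_cases hc : c = ','
        · subst hc
          rw [if_neg (by simp [hx]), if_neg (by simp [ho]), if_pos (by simp)]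
          rw [ih (acc ++ [temp]) []]
          simp only [pvSplit1]
          cases hs : pvSplit1 rest with
          | nil => exact absurd hs (pvSplit1_ne_nil rest)
          | cons r rs => simp [pvRow]
        · rw [if_neg (by simp [hx]), if_neg (by simp [ho]), if_neg (by simp [hc])]
          rw [ih acc temp]
          simp only [pvSplit1, if_neg hc]
          cases hs : pvSplit1 rest with
          | nil => exact absurd hs (pvSplit1_ne_nil rest)
          | cons r rs => simp [pvRow, hx, ho]

-- ===== VERDICT (by name: the statement is the Claim_ definition above) =====
theorem input_parser_spec : Claim_equal_input_parser := by
  intro s _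
  unfold Spec_input_parser input_parser input_parser_alt
  rw [pvSplitOn_eq, pvLoopA s.toList [] []]
  cases hs : pvSplit1 s.toList with
  | nil => exact absurd hs (pvSplit1_ne_nil s.toList)
  | cons r rs => simp [pvRow]
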